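-- pv_equiv track=rewrite | github.com/AnarchyEnthusiast/lazarus-space | mts_to_lua.py | group_by_layer
-- ===== SOURCE A (Python) =====
-- def group_by_layer(entries):
--     """Group entries by y-coordinate for readable output."""
--     layers = {}
--     for dx, dy, dz, alias in entries:
--         if dy not in layers:
--             layers[dy] = []
--         layers[dy].append((dx, dy, dz, alias))
--
--     # Sort each layer by z then x
--     for dy in layers:
--         layers[dy].sort(key=lambda e: (e[2], e[0]))
--
--     return layers
-- ===== SOURCE B (Python) =====
-- def group_by_layer(entries):
--     """Group entries by y-coordinate for readable output."""
--     if not entries: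
--         return {}
--     dy = entries[0][1]
--     same = [(dx, y, dz, a) for (dx, y, dz, a) in entries if y == dy]
--     rest = [e for e in entries if e[1] != dy]
--     layers = {dy: sorted(same, key=lambda e: (e[2], e[0]))}
--     layers.update(group_by_layer(rest))
--     return layers
-- ===== Notes on version B (the rewrite author's own statement) =====
-- stated objective: alternative
-- what changed: Replaces the dict-accumulator (append loop, then an in-place per-key sort pass) by a recursive group-by: take the first entry's y, filter out its whole layer, sort it once, and recurse on the remaining entries.
import Mathlib
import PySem

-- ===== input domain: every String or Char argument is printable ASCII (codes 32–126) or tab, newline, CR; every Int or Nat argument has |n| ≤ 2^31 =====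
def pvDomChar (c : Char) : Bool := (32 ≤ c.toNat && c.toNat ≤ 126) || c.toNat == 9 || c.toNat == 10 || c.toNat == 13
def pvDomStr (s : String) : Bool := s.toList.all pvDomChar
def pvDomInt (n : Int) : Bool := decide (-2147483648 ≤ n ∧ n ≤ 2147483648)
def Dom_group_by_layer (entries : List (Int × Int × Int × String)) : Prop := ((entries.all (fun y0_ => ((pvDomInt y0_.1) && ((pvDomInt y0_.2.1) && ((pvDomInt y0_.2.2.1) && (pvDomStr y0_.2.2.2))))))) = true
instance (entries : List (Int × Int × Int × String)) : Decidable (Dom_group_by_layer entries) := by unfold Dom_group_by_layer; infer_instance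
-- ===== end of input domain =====

-- B replaces A's dict-accumulator (append loop + in-place per-key sort pass) by a
-- recursive group-by: filter out the first entry's whole layer, sort it once, recurse
-- on the rest (objective: alternative decomposition, same results).

-- ===== PORT A =====
-- loop body of A's first for-loop: `if dy not in layers: layers[dy] = []` then `layers[dy].append(...)`
def pvStepA (d : PySem.Dict Int (List (Int × Int × Int × String)))
    (e : Int × Int × Int × String) : PySem.Dict Int (List (Int × Int × Int × String)) :=
  let d1 := if d.contains e.2.1 then d else d.insert e.2.1 []
  d1.modify e.2.1 [] (fun l => l ++ [e])

def group_by_layer (entries : List (Int × Int × Int × String)) : List (Int × List (Int × Int × Int × String)) :=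
  let layers := entries.foldl pvStepA PySem.Dict.empty
  -- `for dy in layers: layers[dy].sort(key=lambda e: (e[2], e[0]))`
  let layers2 := layers.keys.foldl
    (fun d dy => d.modify dy [] (fun l => PySem.List.sorted2 l (fun e => e.2.2.1) (fun e => e.1))) layers
  layers2.items

-- ===== PORT B =====
def group_by_layer_alt : List (Int × Int × Int × String) → List (Int × List (Int × Int × Int × String))
  | [] => []
  | e :: t =>
    let dy := e.2.1
    let same := (e :: t).filter (fun x => x.2.1 == dy)
    let rest := (e :: t).filter (fun x => x.2.1 != dy)
    (dy, PySem.List.sorted2 same (fun x => x.2.2.1) (fun x => x.1)) :: group_by_layer_alt rest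
  termination_by es => es.length
  decreasing_by
    simp only [List.filter_cons, bne_self_eq_false, List.length_cons]
    exact Nat.lt_succ_of_le (List.length_filter_le _ _)

-- ===== PRECONDITION & SPEC =====
def Spec_group_by_layer (entries : List (Int × Int × Int × String)) (out : List (Int × List (Int × Int × Int × String))) : Prop := out = group_by_layer_alt entries
instance (entries : List (Int × Int × Int × String)) (out : List (Int × List (Int × Int × Int × String))) : Decidable (Spec_group_by_layer entries out) := by unfold Spec_group_by_layer; infer_instance

-- ===== CLAIM (what is proved, stated in full; the proofs are below) =====
def Claim_equal_group_by_layer : Prop := ∀ (entries : List (Int × Int × Int × String)), Dom_group_by_layer entries → Spec_group_by_layer entries (group_by_layer entries)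

-- ===== LEMMAS AND PROOFS =====

-- items of `d[k] = f(d.get(k, []))`
theorem pv_items_modify {ν : Type} (d : PySem.Dict Int ν) (k : Int) (d0 : ν) (f : ν → ν)
    (hnd : d.keys.Nodup) :
    (d.modify k d0 f).items =
      (if d.contains k then d.items.map (fun p => if p.1 == k then (k, f p.2) else p)
       else d.items ++ [(k, f d0)]) := by
  by_cases h : d.contains k
  · simp only [PySem.Dict.modify, h, if_true, PySem.Dict.items_insert]
    apply List.map_congr_left
    intro p hp
    by_cases hpk : (p.1 == k) = true
    · have hk : p.1 = k := by simpa using hpk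
      subst hk
      rw [PySem.Dict.getD_of_mem_items d (k := p.1) (v := p.2) (by simpa using hp) hnd d0]
    · simp [hpk]
  · have hc : d.contains k = false := by simp [h]
    simp only [PySem.Dict.modify, hc, Bool.false_eq_true, if_false, PySem.Dict.items_insert,
      PySem.Dict.getD_of_not_contains d d0 hc]

theorem pv_step_keys (d : PySem.Dict Int (List (Int × Int × Int × String))) (e : Int × Int × Int × String) :
    (pvStepA d e).keys = if d.contains e.2.1 then d.keys else d.keys ++ [e.2.1] := by
  by_cases h : d.contains e.2.1
  · simp only [pvStepA, h, if_true, PySem.Dict.keys_modify]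
    exact PySem.Dict.keys_insert_of_contains d _ h
  · have hc : d.contains e.2.1 = false := by simp [h]
    simp only [pvStepA, h, Bool.false_eq_true, if_false, PySem.Dict.keys_modify]
    rw [PySem.Dict.keys_insert_of_contains _ _ (PySem.Dict.contains_insert_self _ _ _),
        PySem.Dict.keys_insert_of_not_contains d _ hc]

theorem pv_step_nodup (d : PySem.Dict Int (List (Int × Int × Int × String))) (e : Int × Int × Int × String)
    (hnd : d.keys.Nodup) : (pvStepA d e).keys.Nodup := by
  rw [pv_step_keys]
  split_ifs with h
  · exact hnd
  · have : e.2.1 ∉ d.keys := fun hm => by simp [(PySem.Dict.contains_iff_mem_keys _ _).mpr hm] at h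
    simp only [List.nodup_append, List.nodup_singleton, true_and, hnd, List.mem_singleton]
    intro a ha b hb hab
    subst hab; subst hb; exact this ha

-- grouping of the remaining entries whose key is not yet among ks (A's first loop, abstractly)
def pvGrpA : List (Int × Int × Int × String) → List Int → List (Int × List (Int × Int × Int × String))
  | [], _ => []
  | e :: t, ks =>
    if e.2.1 ∈ ks then pvGrpA t ks
    else (e.2.1, (e :: t).filter (fun x => x.2.1 == e.2.1)) :: pvGrpA t (ks ++ [e.2.1])

theorem pv_foldA_keys_nodup (entries : List (Int × Int × Int × String))
    (d : PySem.Dict Int (List (Int × Int × Int × String))) (hnd : d.keys.Nodup) :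
    (entries.foldl pvStepA d).keys.Nodup := by
  induction entries generalizing d with
  | nil => exact hnd
  | cons e t ih => exact ih _ (pv_step_nodup d e hnd)

theorem pv_foldA_items (entries : List (Int × Int × Int × String))
    (d : PySem.Dict Int (List (Int × Int × Int × String))) (hnd : d.keys.Nodup) :
    (entries.foldl pvStepA d).items =
      d.items.map (fun p => (p.1, p.2 ++ entries.filter (fun x => x.2.1 == p.1))) ++ pvGrpA entries d.keys := by
  induction entries generalizing d with
  | nil => simp [pvGrpA]
  | cons e t ih =>
    rw [List.foldl_cons, ih _ (pv_step_nodup d e hnd), pv_step_keys]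
    by_cases h : d.contains e.2.1
    · have hmem : e.2.1 ∈ d.keys := (PySem.Dict.contains_iff_mem_keys _ _).mp h
      have hi : (pvStepA d e).items
          = d.items.map (fun p => if p.1 == e.2.1 then (e.2.1, p.2 ++ [e]) else p) := by
        simp only [pvStepA, h, if_true]
        rw [pv_items_modify d _ _ _ hnd]
        simp [h]
      rw [hi]
      simp only [h, if_true, pvGrpA, hmem]
      congr 1
      rw [List.map_map]
      apply List.map_congr_left
      intro p hp
      by_cases hpk : (p.1 == e.2.1) = true
      · have hk : p.1 = e.2.1 := by simpa using hpk
        simp [Function.comp, hk]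
      · have hk : ¬ p.1 = e.2.1 := by simpa using hpk
        simp only [Function.comp_apply, hpk, Bool.false_eq_true, if_false, List.filter_cons]
        have : (e.2.1 == p.1) = false := by simpa using fun hh => hk hh.symm
        simp [this]
    · have hmem : e.2.1 ∉ d.keys := fun hm => h ((PySem.Dict.contains_iff_mem_keys _ _).mpr hm)
      have hc : d.contains e.2.1 = false := by simp [h]
      have hi : (pvStepA d e).items = d.items ++ [(e.2.1, [e])] := by
        simp only [pvStepA, h, Bool.false_eq_true, if_false]
        rw [pv_items_modify _ _ _ _ (by
          rw [PySem.Dict.keys_insert_of_not_contains d _ hc]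
          simp only [List.nodup_append, List.nodup_singleton, true_and, hnd, List.mem_singleton]
          intro a ha b hb hab
          subst hab; subst hb; exact hmem ha)]
        rw [if_pos (PySem.Dict.contains_insert_self _ _ _),
            PySem.Dict.items_insert_of_not_contains d _ hc]
        rw [List.map_append]
        congr 1
        · have hid : ∀ p ∈ d.items,
              (if (p.1 == e.2.1) = true then (e.2.1, p.2 ++ [e]) else p) = id p := by
            intro p hp
            have : ¬ p.1 = e.2.1 := fun hk => hmem (hk ▸ PySem.Dict.mem_keys_of_mem_items _ hp)
            simp [this]
          rw [List.map_congr_left hid, List.map_id]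
        · simp
      rw [hi]
      simp only [h, Bool.false_eq_true, if_false, pvGrpA, hmem]
      rw [List.map_append]
      simp only [List.map_cons, List.map_nil]
      rw [List.append_assoc, List.singleton_append]
      congr 1
      · apply List.map_congr_left
        intro p hp
        have : (e.2.1 == p.1) = false := by
          simpa using fun (hk : e.2.1 = p.1) => hmem (hk ▸ PySem.Dict.mem_keys_of_mem_items _ hp)
        simp [this]
      · congr 2
        simp

theorem pv_sortloop_items (f : List (Int × Int × Int × String) → List (Int × Int × Int × String))
    (ks : List Int) (d : PySem.Dict Int (List (Int × Int × Int × String)))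
    (hnd : d.keys.Nodup) (hks : ks.Nodup) (hsub : ∀ k ∈ ks, k ∈ d.keys) :
    (ks.foldl (fun d k => d.modify k [] f) d).items =
      d.items.map (fun p => if p.1 ∈ ks then (p.1, f p.2) else p) := by
  induction ks generalizing d with
  | nil => simp
  | cons k ks ih =>
    rw [List.foldl_cons]
    have hkc : d.contains k = true :=
      (PySem.Dict.contains_iff_mem_keys _ _).mpr (hsub k (by simp))
    have hikeys : (d.modify k [] f).keys = d.keys := by
      rw [PySem.Dict.keys_modify, PySem.Dict.keys_insert_of_contains d _ hkc]
    have hitems : (d.modify k [] f).items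
        = d.items.map (fun p => if p.1 == k then (k, f p.2) else p) := by
      rw [pv_items_modify d _ _ _ hnd]; simp [hkc]
    rw [ih _ (by rw [hikeys]; exact hnd) hks.of_cons
        (fun a ha => by rw [hikeys]; exact hsub a (by simp [ha]))]
    rw [hitems, List.map_map]
    apply List.map_congr_left
    intro p hp
    by_cases hpk : p.1 = k
    · have hknot : k ∉ ks := by simpa using hks.notMem
      simp [Function.comp, hpk, hknot]
    · have : (p.1 == k) = false := by simpa using hpk
      simp only [Function.comp_apply, this, Bool.false_eq_true, if_false, List.mem_cons]
      by_cases hin : p.1 ∈ ks <;> simp [hin, hpk]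

theorem pv_grpA_map_sort (entries : List (Int × Int × Int × String)) (ks : List Int) :
    (pvGrpA entries ks).map (fun p => (p.1, PySem.List.sorted2 p.2 (fun e => e.2.2.1) (fun e => e.1))) =
      group_by_layer_alt (entries.filter (fun x => decide (x.2.1 ∉ ks))) := by
  induction entries generalizing ks with
  | nil => simp [pvGrpA, group_by_layer_alt]
  | cons e t ih =>
    by_cases hm : e.2.1 ∈ ks
    · simp only [pvGrpA, hm, if_true, List.filter_cons, not_true_eq_false,
        decide_false, Bool.false_eq_true, if_false]
      exact ih ks
    · simp only [pvGrpA, hm, if_false, List.filter_cons, not_false_eq_true,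
        decide_true, if_true, List.map_cons]
    -- unfold one step of B on a nonempty list
      rw [group_by_layer_alt]
      congr 1
      · -- the layer of e.2.1
        simp only [List.filter_cons, BEq.rfl, if_true, List.filter_filter]
        congr 2
        congr 1
        apply List.filter_congr
        intro x hx
        by_cases hxy : x.2.1 = e.2.1
        · simp [hxy, hm]
        · have : (x.2.1 == e.2.1) = false := by simpa using hxy
          simp [this]
      · -- the remaining entries
        rw [ih (ks ++ [e.2.1])]
        congr 1
        simp only [List.filter_cons, bne_self_eq_false, Bool.false_eq_true, if_false,
          List.filter_filter]
        apply List.filter_congr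
        intro x hx
        by_cases hxy : x.2.1 = e.2.1 <;> by_cases hxk : x.2.1 ∈ ks <;>
          simp [hxy, hxk, List.mem_append]

-- ===== VERDICT (by name: the statement is the Claim_ definition above) =====
theorem group_by_layer_spec : Claim_equal_group_by_layer := by
  intro entries _hdom
  unfold Spec_group_by_layer group_by_layer
  have hnd : (entries.foldl pvStepA PySem.Dict.empty).keys.Nodup :=
    pv_foldA_keys_nodup entries _ PySem.Dict.nodup_keys_empty
  rw [pv_sortloop_items _ _ _ hnd hnd (fun k hk => hk)]
  have hmap : ∀ p ∈ (entries.foldl pvStepA PySem.Dict.empty).items,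
      (if p.1 ∈ (entries.foldl pvStepA PySem.Dict.empty).keys
        then (p.1, PySem.List.sorted2 p.2 (fun e => e.2.2.1) (fun e => e.1)) else p)
      = (fun p => (p.1, PySem.List.sorted2 p.2 (fun e => e.2.2.1) (fun e => e.1))) p := by
    intro p hp
    simp [PySem.Dict.mem_keys_of_mem_items _ hp]
  rw [List.map_congr_left hmap]
  have hitems : (entries.foldl pvStepA PySem.Dict.empty).items = pvGrpA entries [] := by
    rw [pv_foldA_items entries _ PySem.Dict.nodup_keys_empty]
    simp [PySem.Dict.empty, PySem.Dict.keys]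
  rw [hitems, pv_grpA_map_sort entries []]
  congr 1
  simp
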